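-- pv_equiv track=rewrite | github.com/InkosiZhong/TVM | tile/layout_generator.py | min_size_filter
-- ===== SOURCE A (Python) =====
-- from typing import List
--
-- def min_size_filter(arr: List[int], has_roi: List[bool], min_size: int):
--     i = 0
--     while i < len(arr) - 1:
--         if arr[i+1] - arr[i] < min_size:
--             if i == 0:              # first element
--                 if has_roi[i] and not has_roi[i+1] and \
--                     arr[i+2] - arr[i+1] >= 2 * min_size:
--                     arr[i+1] = arr[i] + min_size    # adjust the tile containing roi
--                 else:
--                     arr.pop(i+1)                     # merge with the later one
--                     has_roi.pop(i+1 if has_roi[i] else i)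
--             elif i == len(arr) - 2:  # last element
--                 if has_roi[i] and not has_roi[i-1] and \
--                     arr[i] - arr[i-1] >= 2 * min_size:
--                     arr[i] = arr[i+1] - min_size    # adjust the tile containing roi
--                 else:
--                     arr.pop(i)                      # merge with the ahead one
--                     has_roi.pop(i-1 if has_roi[i] else i)
--                     i += 1
--             else:
--                 last_w = arr[i] - arr[i-1]
--                 next_w = arr[i+2] - arr[i+1]
--                 if last_w > next_w:
--                     if has_roi[i] and not has_roi[i+1] and \
--                         arr[i+2] - arr[i+1] >= 2 * min_size:
--                         arr[i+1] = arr[i] + min_size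
--                     elif has_roi[i] and not has_roi[i-1] and \
--                         arr[i] - arr[i-1] >= 2 * min_size:
--                         arr[i] = arr[i+1] - min_size
--                     else:
--                         arr.pop(i+1)
--                         has_roi.pop(i+1 if has_roi[i] else i)
--                 else:
--                     if has_roi[i] and not has_roi[i+1] and \
--                         arr[i+2] - arr[i+1] >= 2 * min_size:
--                         arr[i+1] = arr[i] + min_size
--                     elif has_roi[i] and not has_roi[i-1] and \
--                         arr[i] - arr[i-1] >= 2 * min_size:
--                         arr[i] = arr[i+1] - min_size
--                     else:
--                         arr.pop(i)
--                         has_roi.pop(i-1 if has_roi[i] else i)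
--                         i += 1
--         else:
--             i += 1
--     return arr, has_roi
-- ===== SOURCE B (Python) =====
-- def min_size_filter(arr, has_roi, min_size):
--     n = len(arr)
--     if n <= 1:
--         return arr, has_roi
--     out_a, out_f = [], []            # committed boundaries and the flags of their tiles
--     x, cur = arr[0], has_roi[0]      # current tile: left edge x, roi flag cur
--     for k in range(1, n - 1):        # boundary arr[k] closes the current tile
--         y = arr[k]
--         if y - x >= min_size:
--             out_a.append(x); out_f.append(cur)              # wide enough: commit it
--             x, cur = y, has_roi[k]
--         elif cur and not has_roi[k] and arr[k + 1] - y >= 2 * min_size: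
--             out_a.append(x); out_f.append(cur)              # narrow roi tile: take room from the next tile
--             x, cur = x + min_size, has_roi[k]
--         elif out_a and cur and not out_f[-1] and x - out_a[-1] >= 2 * min_size:
--             out_a.append(y - min_size); out_f.append(cur)   # narrow roi tile: take room from the previous tile
--             x, cur = y, has_roi[k]
--         elif not out_a or x - out_a[-1] > arr[k + 1] - y:
--             cur = cur or has_roi[k]                         # absorb the next tile into this one
--         else:
--             out_f[-1] = out_f[-1] or cur                    # give this tile to the previous one
--             x, cur = y, has_roi[k]
--     # the last boundary: no tile follows, so the tile can only lean on its predecessor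
--     y = arr[n - 1]
--     rest = has_roi[n - 1:]
--     if y - x >= min_size:
--         out_a.append(x); out_f.append(cur)
--     elif out_a and cur and not out_f[-1] and x - out_a[-1] >= 2 * min_size:
--         out_a.append(y - min_size); out_f.append(cur)
--     elif out_a:
--         out_f[-1] = out_f[-1] or cur                        # merge into the previous tile
--     else:
--         return [x], rest                                    # the only tile is too narrow: drop it
--     return out_a + [y], out_f + rest
-- ===== Notes on version B (the rewrite author's own statement) =====
-- stated objective: faster
-- what changed: Replaces A's index-rescanning loop over a mutated list (each merge is an O(n) list.pop and the index re-examines positions) by a single forward pass over tiles that commits boundaries and roi flags to output lists, so each boundary is handled O(1) times; Pre_ excludes inputs where A raises IndexError and inputs whose has_roi list is shorter than len(arr)-1, on which A's flag pops act on misaligned positions and B's natural flag-per-tile read does not exist.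
-- outside the precondition, e.g. on min_size_filter([0, 10], [], 5): A returns ([0, 10], []), B raises IndexError; on min_size_filter([0, 5, 10], [], 3): A returns ([0, 5, 10], []), B raises IndexError
import Mathlib
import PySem

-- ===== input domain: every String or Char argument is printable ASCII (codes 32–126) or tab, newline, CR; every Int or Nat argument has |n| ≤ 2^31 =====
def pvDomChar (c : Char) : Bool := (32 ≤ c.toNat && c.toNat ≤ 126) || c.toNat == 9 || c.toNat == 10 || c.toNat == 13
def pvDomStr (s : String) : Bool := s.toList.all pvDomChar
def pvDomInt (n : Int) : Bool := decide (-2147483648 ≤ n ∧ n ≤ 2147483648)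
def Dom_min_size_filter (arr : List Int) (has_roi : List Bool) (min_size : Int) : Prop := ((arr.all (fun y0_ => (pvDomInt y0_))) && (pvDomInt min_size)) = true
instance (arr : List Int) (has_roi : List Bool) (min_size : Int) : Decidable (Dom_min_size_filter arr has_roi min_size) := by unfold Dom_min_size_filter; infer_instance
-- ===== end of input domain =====

-- B is a single forward pass over the tiles (O(n), no in-place pops) returning the same
-- values as A; A mutates arr/has_roi in place while B builds fresh output lists, so the
-- equivalence claimed here is about the RETURN value only.

-- ===== PORT A =====
-- Literal transliteration of A's while-loop; Python's i is always ≥ 0 here so it is a Nat,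
-- in-range reads arr[i]/has_roi[i] are exact via List.getD; out-of-range reads (where
-- Python raises IndexError) give the getD default and are excluded by Pre_ below.
-- arr[i+1] - arr[i] < min_size is re-tested each iteration; pops are List.eraseIdx.

def aCondR (ms : Int) (a : List Int) (f : List Bool) (i : Nat) : Bool :=
  -- has_roi[i] and not has_roi[i+1] and arr[i+2] - arr[i+1] >= 2 * min_size
  f.getD i false && !(f.getD (i+1) false) && decide (2*ms ≤ a.getD (i+2) 0 - a.getD (i+1) 0)

def aCondL (ms : Int) (a : List Int) (f : List Bool) (i : Nat) : Bool :=
  -- has_roi[i] and not has_roi[i-1] and arr[i] - arr[i-1] >= 2 * min_size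
  f.getD i false && !(f.getD (i-1) false) && decide (2*ms ≤ a.getD i 0 - a.getD (i-1) 0)

-- termination lemmas for aLoop (cited by name in decreasing_by, keeping the
-- well-founded recursion term small)
theorem pv_decA_set1 (ms : Int) (a : List Int) (i : Nat)
    (hrun : i + 1 < a.length) (hgap : a.getD (i+1) 0 - a.getD i 0 < ms) :
    2 * ((a.set (i+1) (a.getD i 0 + ms)).length - i) +
      (if (a.set (i+1) (a.getD i 0 + ms)).getD (i+1) 0 -
          (a.set (i+1) (a.getD i 0 + ms)).getD i 0 < ms then 1 else 0) <
    2 * (a.length - i) + (if a.getD (i+1) 0 - a.getD i 0 < ms then 1 else 0) := by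
  have h1 : (a.set (i+1) (a.getD i 0 + ms)).getD (i+1) 0 = a.getD i 0 + ms := by
    simp [List.getD_eq_getElem?_getD, hrun]
  have h2 : (a.set (i+1) (a.getD i 0 + ms)).getD i 0 = a.getD i 0 := by
    simp [List.getD_eq_getElem?_getD, List.getElem?_set_ne (by omega : i + 1 ≠ i)]
  simp only [h1, h2, List.length_set]
  split_ifs with h <;> omega

theorem pv_decA_set2 (ms : Int) (a : List Int) (i : Nat)
    (hrun : i + 1 < a.length) (hgap : a.getD (i+1) 0 - a.getD i 0 < ms) :
    2 * ((a.set i (a.getD (i+1) 0 - ms)).length - i) +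
      (if (a.set i (a.getD (i+1) 0 - ms)).getD (i+1) 0 -
          (a.set i (a.getD (i+1) 0 - ms)).getD i 0 < ms then 1 else 0) <
    2 * (a.length - i) + (if a.getD (i+1) 0 - a.getD i 0 < ms then 1 else 0) := by
  have h1 : (a.set i (a.getD (i+1) 0 - ms)).getD (i+1) 0 = a.getD (i+1) 0 := by
    simp [List.getD_eq_getElem?_getD, List.getElem?_set_ne (by omega : i ≠ i + 1)]
  have h2 : (a.set i (a.getD (i+1) 0 - ms)).getD i 0 = a.getD (i+1) 0 - ms := by
    simp [List.getD_eq_getElem?_getD, (by omega : i < a.length)]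
  simp only [h1, h2, List.length_set]
  split_ifs with h <;> omega

theorem pv_decA_erase1 (ms : Int) (a b : List Int) (i : Nat)
    (hrun : i + 1 < a.length) (hgap : a.getD (i+1) 0 - a.getD i 0 < ms)
    (hb : b = a.eraseIdx (i+1)) :
    2 * (b.length - i) + (if b.getD (i+1) 0 - b.getD i 0 < ms then 1 else 0) <
    2 * (a.length - i) + (if a.getD (i+1) 0 - a.getD i 0 < ms then 1 else 0) := by
  have hl : b.length = a.length - 1 := by rw [hb, List.length_eraseIdx, if_pos hrun]
  rw [hl]
  split_ifs <;> omega

theorem pv_decA_erase2 (ms : Int) (a b : List Int) (i : Nat)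
    (hrun : i + 1 < a.length) (hgap : a.getD (i+1) 0 - a.getD i 0 < ms)
    (hb : b = a.eraseIdx i) :
    2 * (b.length - (i+1)) + (if b.getD (i+1+1) 0 - b.getD (i+1) 0 < ms then 1 else 0) <
    2 * (a.length - i) + (if a.getD (i+1) 0 - a.getD i 0 < ms then 1 else 0) := by
  have hl : b.length = a.length - 1 := by
    rw [hb, List.length_eraseIdx, if_pos (by omega : i < a.length)]
  rw [hl]
  split_ifs <;> omega

theorem pv_decA_adv (ms : Int) (a : List Int) (i : Nat) (hrun : i + 1 < a.length) :
    2 * (a.length - (i+1)) + (if a.getD (i+1+1) 0 - a.getD (i+1) 0 < ms then 1 else 0) <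
    2 * (a.length - i) + (if a.getD (i+1) 0 - a.getD i 0 < ms then 1 else 0) := by
  split_ifs <;> omega

def aLoop (ms : Int) (a : List Int) (f : List Bool) (i : Nat) : List Int × List Bool :=
  if hrun : i + 1 < a.length then
    if hgap : a.getD (i+1) 0 - a.getD i 0 < ms then
      if i = 0 then
        if aCondR ms a f i then
          aLoop ms (a.set (i+1) (a.getD i 0 + ms)) f i
        else
          aLoop ms (a.eraseIdx (i+1)) (f.eraseIdx (if f.getD i false then i+1 else i)) i
      else if i = a.length - 2 then
        if aCondL ms a f i then
          aLoop ms (a.set i (a.getD (i+1) 0 - ms)) f i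
        else
          aLoop ms (a.eraseIdx i) (f.eraseIdx (if f.getD i false then i-1 else i)) (i+1)
      else
        if a.getD i 0 - a.getD (i-1) 0 > a.getD (i+2) 0 - a.getD (i+1) 0 then
          if aCondR ms a f i then
            aLoop ms (a.set (i+1) (a.getD i 0 + ms)) f i
          else if aCondL ms a f i then
            aLoop ms (a.set i (a.getD (i+1) 0 - ms)) f i
          else
            aLoop ms (a.eraseIdx (i+1)) (f.eraseIdx (if f.getD i false then i+1 else i)) i
        else
          if aCondR ms a f i then
            aLoop ms (a.set (i+1) (a.getD i 0 + ms)) f i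
          else if aCondL ms a f i then
            aLoop ms (a.set i (a.getD (i+1) 0 - ms)) f i
          else
            aLoop ms (a.eraseIdx i) (f.eraseIdx (if f.getD i false then i-1 else i)) (i+1)
    else
      aLoop ms a f (i+1)
  else (a, f)
termination_by 2 * (a.length - i) + (if a.getD (i+1) 0 - a.getD i 0 < ms then 1 else 0)
decreasing_by
  · exact pv_decA_set1 ms a i hrun hgap
  · exact pv_decA_erase1 ms a _ i hrun hgap rfl
  · exact pv_decA_set2 ms a i hrun hgap
  · exact pv_decA_erase2 ms a _ i hrun hgap rfl
  · exact pv_decA_set1 ms a i hrun hgap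
  · exact pv_decA_set2 ms a i hrun hgap
  · exact pv_decA_erase1 ms a _ i hrun hgap rfl
  · exact pv_decA_set1 ms a i hrun hgap
  · exact pv_decA_set2 ms a i hrun hgap
  · exact pv_decA_erase2 ms a _ i hrun hgap rfl
  · exact pv_decA_adv ms a i hrun

def min_size_filter (arr : List Int) (has_roi : List Bool) (min_size : Int) : List Int × List Bool :=
  aLoop min_size arr has_roi 0

-- ===== PORT B =====
-- Literal transliteration of Source B: out_a/out_f are the committed boundaries and tile
-- flags, x/cur the current tile's left edge and roi flag, k the index of the boundary
-- that would close the current tile.  bFinal is the code after Source B's for-loop.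

def bFinal (arr : List Int) (f0 : List Bool) (ms : Int) (out_a : List Int) (out_f : List Bool)
    (x : Int) (cur : Bool) : List Int × List Bool :=
  -- y = arr[n-1]; rest = has_roi[n-1:]
  if ms ≤ arr.getD (arr.length - 1) 0 - x then
    (out_a ++ [x] ++ [arr.getD (arr.length - 1) 0], out_f ++ [cur] ++ f0.drop (arr.length - 1))
  else if out_a ≠ [] ∧ cur = true ∧ out_f.getLastD false = false ∧ 2*ms ≤ x - out_a.getLastD 0 then
    (out_a ++ [arr.getD (arr.length - 1) 0 - ms] ++ [arr.getD (arr.length - 1) 0],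
     out_f ++ [cur] ++ f0.drop (arr.length - 1))
  else if out_a ≠ [] then
    (out_a ++ [arr.getD (arr.length - 1) 0],
     out_f.dropLast ++ [out_f.getLastD false || cur] ++ f0.drop (arr.length - 1))
  else
    ([x], f0.drop (arr.length - 1))

def bLoop (arr : List Int) (f0 : List Bool) (ms : Int) (out_a : List Int) (out_f : List Bool)
    (x : Int) (cur : Bool) (k : Nat) : List Int × List Bool :=
  if h : k < arr.length - 1 then
    -- y = arr[k]
    if ms ≤ arr.getD k 0 - x then
      -- wide enough: commit it
      bLoop arr f0 ms (out_a ++ [x]) (out_f ++ [cur]) (arr.getD k 0) (f0.getD k false) (k+1)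
    else if cur = true ∧ f0.getD k false = false ∧ 2*ms ≤ arr.getD (k+1) 0 - arr.getD k 0 then
      -- narrow roi tile: take room from the next tile
      bLoop arr f0 ms (out_a ++ [x]) (out_f ++ [cur]) (x + ms) (f0.getD k false) (k+1)
    else if out_a ≠ [] ∧ cur = true ∧ out_f.getLastD false = false ∧ 2*ms ≤ x - out_a.getLastD 0 then
      -- narrow roi tile: take room from the previous tile
      bLoop arr f0 ms (out_a ++ [arr.getD k 0 - ms]) (out_f ++ [cur]) (arr.getD k 0) (f0.getD k false) (k+1)
    else if out_a = [] ∨ arr.getD (k+1) 0 - arr.getD k 0 < x - out_a.getLastD 0 then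
      -- absorb the next tile into this one
      bLoop arr f0 ms out_a out_f x (cur || f0.getD k false) (k+1)
    else
      -- give this tile to the previous one
      bLoop arr f0 ms out_a (out_f.dropLast ++ [out_f.getLastD false || cur])
        (arr.getD k 0) (f0.getD k false) (k+1)
  else bFinal arr f0 ms out_a out_f x cur
termination_by arr.length - k
decreasing_by all_goals omega

def min_size_filter_alt (arr : List Int) (has_roi : List Bool) (min_size : Int) : List Int × List Bool :=
  if arr.length ≤ 1 then (arr, has_roi)
  else bLoop arr has_roi min_size [] [] (arr.getD 0 0) (has_roi.getD 0 false) 1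

-- ===== PRECONDITION & SPEC =====
-- Closed-form description of exactly how A's head phase (cursor still at i = 0, merging
-- keeps removing arr[1]) can reach a 2-element arr whose first tile carries the roi flag,
-- where Python A raises IndexError on arr[i+2] (or on the has_roi reads/pops).
def Crash_min_size_filter (ms : Int) (a : List Int) (f : List Bool) : Prop :=
  2 ≤ a.length ∧
  (∀ k, k < a.length - 2 →
      a.getD (k+1) 0 - a.getD 0 0 < ms ∧
      ¬((∃ j, j ≤ k ∧ f.getD j false = true) ∧ f.getD (k+1) false = false ∧
          2*ms ≤ a.getD (k+2) 0 - a.getD (k+1) 0)) ∧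
  a.getD (a.length - 1) 0 - a.getD 0 0 < ms ∧
  (∃ j, j ≤ a.length - 2 ∧ f.getD j false = true) ∧
  f.getD (a.length - 1) false = false

-- Pre_ excludes exactly the inputs on which Python A raises IndexError, plus (for ≥ 2
-- boundaries) inputs whose has_roi list is shorter than len(arr) - 1, where the flag list
-- has no entry for some tiles: A's pops then act on misaligned positions (A returns on
-- some of these, e.g. when no gap is below min_size, but the shape is malformed for the
-- task and B's natural flag-per-tile read does not exist there).
def Pre_min_size_filter (arr : List Int) (has_roi : List Bool) (min_size : Int) : Prop :=
  arr.length ≤ 1 ∨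
    (arr.length ≤ has_roi.length + 1 ∧ ¬ Crash_min_size_filter min_size arr has_roi)

instance (arr : List Int) (has_roi : List Bool) (min_size : Int) :
    Decidable (Pre_min_size_filter arr has_roi min_size) := by
  unfold Pre_min_size_filter Crash_min_size_filter; infer_instance

def pvWitness_min_size_filter : List Int × List Bool × Int := ([0, 10, 20], [false, true], 5)

def Spec_min_size_filter (arr : List Int) (has_roi : List Bool) (min_size : Int) (out : List Int × List Bool) : Prop := out = min_size_filter_alt arr has_roi min_size
instance (arr : List Int) (has_roi : List Bool) (min_size : Int) (out : List Int × List Bool) : Decidable (Spec_min_size_filter arr has_roi min_size out) := by unfold Spec_min_size_filter; infer_instance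

-- ===== CLAIM (what is proved, stated in full; the proofs are below) =====
def Claim_equal_min_size_filter : Prop := ∀ (arr : List Int) (has_roi : List Bool) (min_size : Int), Dom_min_size_filter arr has_roi min_size → Pre_min_size_filter arr has_roi min_size → Spec_min_size_filter arr has_roi min_size (min_size_filter arr has_roi min_size)

-- ===== LEMMAS AND PROOFS =====

-- ---------- small list index helpers ----------

theorem pv_getD_drop {α : Type} (l : List α) (j t : Nat) (d : α) :
    (l.drop j).getD t d = l.getD (j + t) d := by
  simp [List.getD_eq_getElem?_getD, List.getElem?_drop]

theorem pv_getD_tail {α : Type} (l : List α) (t : Nat) (d : α) :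
    l.tail.getD t d = l.getD (t+1) d := by
  cases l <;> simp [List.getD]

theorem pv_drop_eq_getD_cons {α : Type} (l : List α) (j : Nat) (d : α) (h : j < l.length) :
    l.drop j = l.getD j d :: l.drop (j+1) := by
  rw [List.drop_eq_getElem_cons h, List.getD_eq_getElem l d h]

theorem pv_tail_drop {α : Type} (l : List α) (j : Nat) : (l.drop j).tail = l.drop (j+1) := by
  rw [← List.drop_one, List.drop_drop]

theorem pv_getD_append_cons {α : Type} (p : List α) (x : α) (r : List α) (t : Nat) (d : α) :
    (p ++ x :: r).getD (p.length + t) d = (x :: r).getD t d := by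
  simp [List.getD_eq_getElem?_getD, List.getElem?_append_right (Nat.le_add_right p.length t)]

theorem pv_getD_append_left {α : Type} (p : List α) (r : List α) (t : Nat) (d : α) (h : t < p.length) :
    (p ++ r).getD t d = p.getD t d := by
  simp [List.getD_eq_getElem?_getD, List.getElem?_append_left h]

theorem pv_getD_last {α : Type} (p : List α) (d : α) (h : p ≠ []) :
    p.getD (p.length - 1) d = p.getLastD d := by
  induction p with
  | nil => simp at h
  | cons a l ih =>
    cases l with
    | nil => simp [List.getD]
    | cons b m =>
      have h2 : (a :: b :: m).length - 1 = (b :: m).length - 1 + 1 := by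
        simp only [List.length_cons]; omega
      rw [h2, List.getD_cons_succ, ih (by simp)]
      simp [List.getLastD_cons]

theorem pv_getD_append_last {α : Type} (p : List α) (r : List α) (d : α) (h : p ≠ []) :
    (p ++ r).getD (p.length - 1) d = p.getLastD d := by
  have hl : 0 < p.length := List.length_pos_of_ne_nil h
  rw [pv_getD_append_left p r _ d (by omega), pv_getD_last p d h]

theorem pv_set_append_cons_self {α : Type} (p : List α) (x v : α) (r : List α) :
    (p ++ x :: r).set p.length v = p ++ v :: r := by
  induction p with
  | nil => simp
  | cons a l ih => simp [List.set, ih]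

theorem pv_set_append_cons_succ {α : Type} (p : List α) (x v : α) (r : List α) :
    (p ++ x :: r).set (p.length + 1) v = p ++ x :: r.set 0 v := by
  induction p with
  | nil => simp [List.set]
  | cons a l ih =>
    have h : (a :: l).length + 1 = (l.length + 1) + 1 := by simp
    simp only [h, List.cons_append, List.set]
    rw [ih]

theorem pv_eraseIdx_zero {α : Type} (l : List α) : l.eraseIdx 0 = l.tail := by
  cases l <;> simp

theorem pv_eraseIdx_append_cons_self {α : Type} (p : List α) (x : α) (r : List α) :
    (p ++ x :: r).eraseIdx p.length = p ++ r := by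
  induction p with
  | nil => simp
  | cons a l ih => simp [List.eraseIdx, ih]

theorem pv_eraseIdx_append_cons_succ {α : Type} (p : List α) (x : α) (r : List α) :
    (p ++ x :: r).eraseIdx (p.length + 1) = p ++ x :: r.eraseIdx 0 := by
  induction p with
  | nil => simp [List.eraseIdx]
  | cons a l ih =>
    have h : (a :: l).length + 1 = (l.length + 1) + 1 := by simp
    simp only [h, List.cons_append, List.eraseIdx]
    rw [ih]

theorem pv_eraseIdx_append_sub_one {α : Type} (p : List α) (r : List α) (h : p ≠ []) :
    (p ++ r).eraseIdx (p.length - 1) = p.dropLast ++ r := by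
  induction p with
  | nil => simp at h
  | cons a l ih =>
    cases l with
    | nil => simp [List.eraseIdx]
    | cons b m =>
      have h2 : (a :: b :: m).length - 1 = ((b :: m).length - 1) + 1 := by
        simp only [List.length_cons]; omega
      simp only [h2, List.cons_append, List.eraseIdx]
      rw [show b :: (m ++ r) = (b :: m) ++ r from rfl, ih (by simp)]
      simp

theorem pv_getD_shift2 {α : Type} (a b : α) (l : List α) (t : Nat) (d : α) (h : 1 ≤ t) :
    (a :: b :: l).getD (t+1) d = (a :: l).getD t d := by
  match t, h with
  | Nat.succ s, _ => simp [List.getD_cons_succ]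

theorem pv_getD_shift_tail {α : Type} (b : α) (ft : List α) (t : Nat) (d : α) (h : 1 ≤ t) :
    (b :: ft).getD (t+1) d = (b :: ft.tail).getD t d := by
  match t, h with
  | Nat.succ s, _ => simp [List.getD_cons_succ, pv_getD_tail]

theorem pv_getLastD_concat_aux {α : Type} (l : List α) (x : α) :
    ∀ d, (l ++ [x]).getLastD d = x := by
  induction l with
  | nil => intro d; rfl
  | cons a t ih => intro d; rw [List.cons_append, List.getLastD_cons]; exact ih a

theorem pv_getLastD_concat {α : Type} (l : List α) (x : α) (d : α) :
    (l ++ [x]).getLastD d = x := pv_getLastD_concat_aux l x d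

theorem pv_dropLast_concat_getLastD {α : Type} (l : List α) (d : α) (h : l ≠ []) :
    l.dropLast ++ [l.getLastD d] = l := by
  induction l with
  | nil => simp at h
  | cons a t ih =>
    cases t with
    | nil => simp
    | cons b m =>
      have h1 : (a :: b :: m).dropLast = a :: (b :: m).dropLast := by simp
      have h2 : (a :: b :: m).getLastD d = (b :: m).getLastD d := by
        simp [List.getLastD_cons]
      rw [h1, h2, List.cons_append, ih (by simp)]

-- ---------- crash-condition lemmas ----------

theorem crash_two (ms : Int) (a : List Int) (f : List Bool) (hlen : a.length = 2)
    (hgap : a.getD 1 0 - a.getD 0 0 < ms) (hf0 : f.getD 0 false = true)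
    (hf1 : f.getD 1 false = false) : Crash_min_size_filter ms a f := by
  have h1 : a.length - 1 = 1 := by omega
  refine ⟨by omega, ?_, ?_, ⟨0, by omega, hf0⟩, ?_⟩
  · intro k hk; exact absurd hk (by omega)
  · rw [h1]; exact hgap
  · rw [h1]; exact hf1

theorem crash_shift (ms : Int) (a : List Int) (f : List Bool)
    (h3 : 3 ≤ a.length)
    (hgap : a.getD 1 0 - a.getD 0 0 < ms)
    (hnr : ¬(f.getD 0 false = true ∧ f.getD 1 false = false ∧ 2*ms ≤ a.getD 2 0 - a.getD 1 0))
    (hc : Crash_min_size_filter ms (a.eraseIdx 1) (f.eraseIdx (if f.getD 0 false then 1 else 0))) :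
    Crash_min_size_filter ms a f := by
  obtain ⟨a0, a1, rest, rfl⟩ : ∃ a0 a1 rest, a = a0 :: a1 :: rest := by
    match a, h3 with
    | a0 :: a1 :: rest, _ => exact ⟨a0, a1, rest, rfl⟩
  have hr1 : 1 ≤ rest.length := by
    simp only [List.length_cons] at h3; omega
  have hA : (a0 :: a1 :: rest).eraseIdx 1 = a0 :: rest := by
    simp [List.eraseIdx]
  rw [hA] at hc
  by_cases hb : f.getD 0 false = true
  · -- front flag true: f = true :: ft, erased flag list = true :: ft.tail
    obtain ⟨ft, rfl⟩ : ∃ ft, f = true :: ft := by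
      cases f with
      | nil => simp [List.getD] at hb
      | cons b ft =>
        cases b
        · simp [List.getD] at hb
        · exact ⟨ft, rfl⟩
    rw [if_pos (by simp [List.getD]), show (true :: ft).eraseIdx 1 = true :: ft.tail by
      simp [List.eraseIdx, pv_eraseIdx_zero]] at hc
    obtain ⟨c1, c2, c3, c4, c5⟩ := hc
    simp only [Crash_min_size_filter, List.length_cons] at *
    have E2 : rest.length + 1 + 1 - 2 = rest.length := by omega
    have E4 : rest.length + 1 + 1 - 1 = rest.length + 1 := by omega
    rw [E2, E4]
    rw [show rest.length + 1 - 1 = rest.length from by omega] at c3 c5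
    rw [show rest.length + 1 - 2 = rest.length - 1 from by omega] at c4
    refine ⟨by omega, ?_, ?_, ⟨0, by omega, rfl⟩, ?_⟩
    · intro k hk
      match k with
      | 0 =>
        refine ⟨by simpa [List.getD] using hgap, ?_⟩
        rintro ⟨-, hX, hY⟩
        exact hnr ⟨rfl, hX, hY⟩
      | Nat.succ t =>
        obtain ⟨hc2a, hc2b⟩ := c2 t (by omega)
        constructor
        · rw [show t + 1 + 1 = (t+1) + 1 from rfl,
            pv_getD_shift2 a0 a1 rest (t+1) 0 (by omega)]
          simpa [List.getD] using hc2a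
        · rintro ⟨-, hX, hY⟩
          refine hc2b ⟨⟨0, by omega, rfl⟩, ?_, ?_⟩
          · rw [show t + 1 + 1 = (t+1) + 1 from rfl,
              pv_getD_shift_tail true ft (t+1) false (by omega)] at hX
            exact hX
          · rw [show t + 1 + 2 = (t+2) + 1 from rfl,
              pv_getD_shift2 a0 a1 rest (t+2) 0 (by omega),
              show t + 1 + 1 = (t+1) + 1 from rfl,
              pv_getD_shift2 a0 a1 rest (t+1) 0 (by omega)] at hY
            exact hY
    · rw [pv_getD_shift2 a0 a1 rest rest.length 0 hr1]
      simpa [List.getD] using c3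
    · rw [pv_getD_shift_tail true ft rest.length false hr1]
      exact c5
  · -- front flag false (or flag list empty)
    have hb' : f.getD 0 false = false := by
      cases h : f.getD 0 false
      · rfl
      · exact absurd h hb
    rw [if_neg (by simpa [List.getD] using hb), pv_eraseIdx_zero] at hc
    cases f with
    | nil =>
      obtain ⟨c1, c2, c3, c4, c5⟩ := hc
      obtain ⟨j, -, hj⟩ := c4
      simp [List.getD] at hj
    | cons b ft =>
      have hbf : b = false := by simpa [List.getD] using hb'
      subst hbf
      simp only [List.tail_cons] at hc
      obtain ⟨c1, c2, c3, c4, c5⟩ := hc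
      simp only [Crash_min_size_filter, List.length_cons] at *
      have E2 : rest.length + 1 + 1 - 2 = rest.length := by omega
      have E4 : rest.length + 1 + 1 - 1 = rest.length + 1 := by omega
      rw [E2, E4]
      rw [show rest.length + 1 - 1 = rest.length from by omega] at c3 c5
      rw [show rest.length + 1 - 2 = rest.length - 1 from by omega] at c4
      refine ⟨by omega, ?_, ?_, ?_, ?_⟩
      · intro k hk
        match k with
        | 0 =>
          refine ⟨by simpa [List.getD] using hgap, ?_⟩
          rintro ⟨⟨j, hj0, hj⟩, -, -⟩
          interval_cases j
          simp [List.getD] at hj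
        | Nat.succ t =>
          obtain ⟨hc2a, hc2b⟩ := c2 t (by omega)
          constructor
          · rw [show t + 1 + 1 = (t+1) + 1 from rfl,
              pv_getD_shift2 a0 a1 rest (t+1) 0 (by omega)]
            simpa [List.getD] using hc2a
          · rintro ⟨⟨j, hj0, hj⟩, hX, hY⟩
            refine hc2b ⟨?_, ?_, ?_⟩
            · match j, hj with
              | 0, hj => simp [List.getD] at hj
              | Nat.succ j', hj => exact ⟨j', by omega, by simpa [List.getD] using hj⟩
            · simpa [List.getD] using hX
            · rw [show t + 1 + 2 = (t+2) + 1 from rfl,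
                pv_getD_shift2 a0 a1 rest (t+2) 0 (by omega),
                show t + 1 + 1 = (t+1) + 1 from rfl,
                pv_getD_shift2 a0 a1 rest (t+1) 0 (by omega)] at hY
              exact hY
      · rw [pv_getD_shift2 a0 a1 rest rest.length 0 hr1]
        simpa [List.getD] using c3
      · obtain ⟨j, hj0, hj⟩ := c4
        exact ⟨j + 1, by omega, by simpa [List.getD] using hj⟩
      · simpa [List.getD] using c5

-- ---------- read helpers ----------

theorem pv_read0 {α : Type} (p : List α) (x : α) (r : List α) (d : α) :
    (p ++ x :: r).getD p.length d = x := by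
  have h := pv_getD_append_cons p x r 0 d
  simpa using h

theorem pv_read1 {α : Type} (p : List α) (x : α) (l : List α) (j : Nat) (d : α) :
    (p ++ x :: l.drop j).getD (p.length + 1) d = l.getD j d := by
  rw [pv_getD_append_cons p x _ 1 d, List.getD_cons_succ, pv_getD_drop, Nat.add_zero]

theorem pv_read2 {α : Type} (p : List α) (x : α) (l : List α) (j : Nat) (d : α) :
    (p ++ x :: l.drop j).getD (p.length + 1 + 1) d = l.getD (j+1) d := by
  rw [show p.length + 1 + 1 = p.length + (1+1) from by omega,
    pv_getD_append_cons p x _ (1+1) d, List.getD_cons_succ, pv_getD_drop]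

theorem pv_read_last {α : Type} (p : List α) (x : α) (r : List α) (d : α) (h : p ≠ []) :
    (p ++ x :: r).getD (p.length - 1) d = p.getLastD d :=
  pv_getD_append_last p (x :: r) d h

-- ---------- the loop invariant ----------

def MsfInv (ms : Int) (arr : List Int) (f0 : List Bool) (out_a : List Int) (out_f : List Bool)
    (x : Int) (cur : Bool) (k : Nat) (a : List Int) (f : List Bool) (i : Nat) : Prop :=
  a = out_a ++ x :: arr.drop k ∧ i = out_a.length ∧
  f = out_f ++ cur :: f0.drop k ∧ out_f.length = i ∧
  1 ≤ k ∧ k ≤ arr.length - 1 ∧ arr.length ≤ f0.length + 1 ∧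
  (out_a = [] → ¬ Crash_min_size_filter ms a f) ∧
  (out_a ≠ [] → ms ≤ x - out_a.getLastD 0 ∨ ms ≤ arr.getD k 0 - x)

def LoopIH (ms : Int) (arr : List Int) (f0 : List Bool) (N : Nat) : Prop :=
  ∀ (out_a : List Int) (out_f : List Bool) (x : Int) (cur : Bool) (k : Nat)
    (a : List Int) (f : List Bool) (i : Nat),
    arr.length - k ≤ N →
    MsfInv ms arr f0 out_a out_f x cur k a f i →
    aLoop ms a f i = bLoop arr f0 ms out_a out_f x cur k


-- ---------- one lemma per loop action: A's next state equals B's next call ----------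

theorem step_commit (ms : Int) (arr : List Int) (f0 : List Bool) (N : Nat)
    (out_a : List Int) (out_f : List Bool) (x : Int) (cur : Bool) (k : Nat)
    (a : List Int) (f : List Bool) (i : Nat)
    (ih : LoopIH ms arr f0 N)
    (ha : a = out_a ++ x :: arr.drop k) (hi : i = out_a.length)
    (hf : f = out_f ++ cur :: f0.drop k) (hof : out_f.length = i)
    (hk1 : 1 ≤ k) (hk : k < arr.length - 1) (hflen : arr.length ≤ f0.length + 1)
    (hN : arr.length - k ≤ N + 1)
    (hc1 : ms ≤ arr.getD k 0 - x) :
    aLoop ms a f (i+1) =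
      bLoop arr f0 ms (out_a ++ [x]) (out_f ++ [cur]) (arr.getD k 0) (f0.getD k false) (k+1) := by
  have hkn : k < arr.length := by omega
  have hkf : k < f0.length := by omega
  apply ih
  · omega
  refine ⟨?_, by simp [hi], ?_, by simp [hof], by omega, by omega, hflen,
    fun h => absurd h (by simp), fun _ => Or.inl (by rw [pv_getLastD_concat]; omega)⟩
  · rw [ha, pv_drop_eq_getD_cons arr k (0:Int) hkn]; simp
  · rw [hf, pv_drop_eq_getD_cons f0 k false hkf]; simp

theorem step_widenR (ms : Int) (arr : List Int) (f0 : List Bool) (N : Nat)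
    (out_a : List Int) (out_f : List Bool) (x : Int) (cur : Bool) (k : Nat)
    (a : List Int) (f : List Bool) (i : Nat)
    (ih : LoopIH ms arr f0 N)
    (ha : a = out_a ++ x :: arr.drop k) (hi : i = out_a.length)
    (hf : f = out_f ++ cur :: f0.drop k) (hof : out_f.length = i)
    (hk1 : 1 ≤ k) (hk : k < arr.length - 1) (hflen : arr.length ≤ f0.length + 1)
    (hN : arr.length - k ≤ N + 1) :
    aLoop ms (a.set (i+1) (x + ms)) f i =
      bLoop arr f0 ms (out_a ++ [x]) (out_f ++ [cur]) (x + ms) (f0.getD k false) (k+1) := by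
  have hkn : k < arr.length := by omega
  have hkf : k < f0.length := by omega
  have ha' : a.set (i+1) (x + ms) = out_a ++ x :: (x + ms) :: arr.drop (k+1) := by
    rw [ha, hi, pv_drop_eq_getD_cons arr k (0:Int) hkn, pv_set_append_cons_succ]; simp
  have g1 : (out_a ++ x :: (x + ms) :: arr.drop (k+1)).getD (i+1) 0 = x + ms := by
    rw [hi, pv_getD_append_cons out_a x _ 1]; simp
  have g0 : (out_a ++ x :: (x + ms) :: arr.drop (k+1)).getD i 0 = x := by
    rw [hi]; exact pv_read0 _ _ _ _
  rw [ha', aLoop,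
    dif_pos (by simp only [List.length_append, List.length_cons, List.length_drop]; omega),
    dif_neg (by rw [g1, g0]; omega)]
  apply ih
  · omega
  refine ⟨by simp, by simp [hi], ?_, by simp [hof], by omega, by omega, hflen,
    fun h => absurd h (by simp), fun _ => Or.inl (by rw [pv_getLastD_concat]; omega)⟩
  rw [hf, pv_drop_eq_getD_cons f0 k false hkf]; simp

theorem step_widenL (ms : Int) (arr : List Int) (f0 : List Bool) (N : Nat)
    (out_a : List Int) (out_f : List Bool) (x : Int) (cur : Bool) (k : Nat)
    (a : List Int) (f : List Bool) (i : Nat)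
    (ih : LoopIH ms arr f0 N)
    (ha : a = out_a ++ x :: arr.drop k) (hi : i = out_a.length)
    (hf : f = out_f ++ cur :: f0.drop k) (hof : out_f.length = i)
    (hk1 : 1 ≤ k) (hk : k < arr.length - 1) (hflen : arr.length ≤ f0.length + 1)
    (hN : arr.length - k ≤ N + 1) :
    aLoop ms (a.set i (arr.getD k 0 - ms)) f i =
      bLoop arr f0 ms (out_a ++ [arr.getD k 0 - ms]) (out_f ++ [cur]) (arr.getD k 0)
        (f0.getD k false) (k+1) := by
  have hkn : k < arr.length := by omega
  have hkf : k < f0.length := by omega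
  have ha' : a.set i (arr.getD k 0 - ms) =
      out_a ++ (arr.getD k 0 - ms) :: arr.getD k 0 :: arr.drop (k+1) := by
    rw [ha, hi, pv_set_append_cons_self, pv_drop_eq_getD_cons arr k (0:Int) hkn]
  have g1 : (out_a ++ (arr.getD k 0 - ms) :: arr.getD k 0 :: arr.drop (k+1)).getD (i+1) 0 =
      arr.getD k 0 := by
    rw [hi, pv_getD_append_cons out_a _ _ 1]; simp
  have g0 : (out_a ++ (arr.getD k 0 - ms) :: arr.getD k 0 :: arr.drop (k+1)).getD i 0 =
      arr.getD k 0 - ms := by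
    rw [hi]; exact pv_read0 _ _ _ _
  rw [ha', aLoop,
    dif_pos (by simp only [List.length_append, List.length_cons, List.length_drop]; omega),
    dif_neg (by rw [g1, g0]; omega)]
  apply ih
  · omega
  refine ⟨by simp, by simp [hi], ?_, by simp [hof], by omega, by omega, hflen,
    fun h => absurd h (by simp), fun _ => Or.inl (by rw [pv_getLastD_concat]; omega)⟩
  rw [hf, pv_drop_eq_getD_cons f0 k false hkf]; simp

theorem step_mergeR (ms : Int) (arr : List Int) (f0 : List Bool) (N : Nat)
    (out_a : List Int) (out_f : List Bool) (x : Int) (cur : Bool) (k : Nat)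
    (a : List Int) (f : List Bool) (i : Nat)
    (ih : LoopIH ms arr f0 N)
    (ha : a = out_a ++ x :: arr.drop k) (hi : i = out_a.length)
    (hf : f = out_f ++ cur :: f0.drop k) (hof : out_f.length = i)
    (hk1 : 1 ≤ k) (hk : k < arr.length - 1) (hflen : arr.length ≤ f0.length + 1)
    (hN : arr.length - k ≤ N + 1)
    (hcr' : out_a = [] → ¬ Crash_min_size_filter ms (a.eraseIdx (i+1))
        (f.eraseIdx (if cur = true then i+1 else i)))
    (hwid : out_a ≠ [] → ms ≤ x - out_a.getLastD 0) :
    aLoop ms (a.eraseIdx (i+1)) (f.eraseIdx (if cur = true then i+1 else i)) i =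
      bLoop arr f0 ms out_a out_f x (cur || f0.getD k false) (k+1) := by
  have hkn : k < arr.length := by omega
  have hkf : k < f0.length := by omega
  have ha' : a.eraseIdx (i+1) = out_a ++ x :: arr.drop (k+1) := by
    rw [ha, hi, pv_eraseIdx_append_cons_succ, pv_eraseIdx_zero, pv_tail_drop]
  have hf' : f.eraseIdx (if cur = true then i+1 else i) =
      out_f ++ (cur || f0.getD k false) :: f0.drop (k+1) := by
    cases cur with
    | true =>
      rw [if_pos rfl, hf, ← hof, pv_eraseIdx_append_cons_succ, pv_eraseIdx_zero, pv_tail_drop]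
      simp
    | false =>
      rw [if_neg (by simp), hf, ← hof, pv_eraseIdx_append_cons_self,
        pv_drop_eq_getD_cons f0 k false hkf]
      simp
  rw [ha', hf'] at hcr' ⊢
  apply ih
  · omega
  exact ⟨rfl, hi, rfl, hof, by omega, by omega, hflen, hcr',
    fun h => Or.inl (hwid h)⟩

theorem step_mergeL (ms : Int) (arr : List Int) (f0 : List Bool) (N : Nat)
    (out_a : List Int) (out_f : List Bool) (x : Int) (cur : Bool) (k : Nat)
    (a : List Int) (f : List Bool) (i : Nat)
    (ih : LoopIH ms arr f0 N)
    (ha : a = out_a ++ x :: arr.drop k) (hi : i = out_a.length)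
    (hf : f = out_f ++ cur :: f0.drop k) (hof : out_f.length = i)
    (hk1 : 1 ≤ k) (hk : k < arr.length - 1) (hflen : arr.length ≤ f0.length + 1)
    (hN : arr.length - k ≤ N + 1)
    (hi0 : i ≠ 0)
    (hnw : ms ≤ arr.getD (k+1) 0 - arr.getD k 0) :
    aLoop ms (a.eraseIdx i) (f.eraseIdx (if cur = true then i-1 else i)) (i+1) =
      bLoop arr f0 ms out_a (out_f.dropLast ++ [out_f.getLastD false || cur])
        (arr.getD k 0) (f0.getD k false) (k+1) := by
  have hkn : k < arr.length := by omega
  have hkf : k < f0.length := by omega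
  have hofne : out_f ≠ [] := by
    intro h; rw [h] at hof; simp at hof; omega
  have hoflen := List.length_pos_of_ne_nil hofne
  have ha' : a.eraseIdx i = out_a ++ arr.getD k 0 :: arr.drop (k+1) := by
    rw [ha, hi, pv_eraseIdx_append_cons_self, pv_drop_eq_getD_cons arr k (0:Int) hkn]
  have hf' : f.eraseIdx (if cur = true then i-1 else i) =
      (out_f.dropLast ++ [out_f.getLastD false || cur]) ++ f0.getD k false :: f0.drop (k+1) := by
    cases cur with
    | true =>
      rw [if_pos rfl, hf, show i - 1 = out_f.length - 1 from by omega,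
        pv_eraseIdx_append_sub_one out_f _ hofne, pv_drop_eq_getD_cons f0 k false hkf]
      simp
    | false =>
      rw [if_neg (by simp), hf, ← hof, pv_eraseIdx_append_cons_self]
      conv_lhs => rw [← pv_dropLast_concat_getLastD out_f false hofne]
      rw [pv_drop_eq_getD_cons f0 k false hkf]
      simp
  by_cases hkk : k + 1 < arr.length - 1
  · rw [bLoop, dif_pos hkk, if_pos hnw]
    have hkn1 : k + 1 < arr.length := by omega
    have hkf1 : k + 1 < f0.length := by omega
    apply ih
    · omega
    refine ⟨?_, by simp [hi], ?_, ?_, by omega, by omega, hflen,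
      fun h => absurd h (by simp), fun _ => Or.inl (by rw [pv_getLastD_concat]; omega)⟩
    · rw [ha', pv_drop_eq_getD_cons arr (k+1) (0:Int) hkn1]; simp
    · rw [hf', pv_drop_eq_getD_cons f0 (k+1) false hkf1]; simp
    · simp only [List.length_append, List.length_dropLast, List.length_cons, List.length_nil]
      omega
  · -- k + 1 = arr.length - 1 : the forced commit is the final step
    have hE : arr.length - 1 = k + 1 := by omega
    rw [bLoop, dif_neg hkk]
    unfold bFinal
    rw [hE, if_pos hnw]
    have hdrop : arr.drop (k+2) = ([] : List Int) := List.drop_eq_nil_of_le (by omega)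
    have hlen' : (out_a ++ arr.getD k 0 :: arr.drop (k+1)).length = i + 2 := by
      simp only [List.length_append, List.length_cons, List.length_drop]; omega
    rw [ha', hf', aLoop, dif_neg (by rw [hlen']; omega)]
    rw [pv_drop_eq_getD_cons arr (k+1) (0:Int) (by omega), hdrop]
    simp

-- ---------- the final step (k = arr.length - 1) ----------

theorem final_eq (ms : Int) (arr : List Int) (f0 : List Bool)
    (out_a : List Int) (out_f : List Bool) (x : Int) (cur : Bool) (k : Nat)
    (a : List Int) (f : List Bool) (i : Nat)
    (ha : a = out_a ++ x :: arr.drop k) (hi : i = out_a.length)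
    (hf : f = out_f ++ cur :: f0.drop k) (hof : out_f.length = i)
    (hk1 : 1 ≤ k) (hk2 : k ≤ arr.length - 1) (hflen : arr.length ≤ f0.length + 1)
    (hcr : out_a = [] → ¬ Crash_min_size_filter ms a f)
    (hk : ¬ k < arr.length - 1) :
    aLoop ms a f i = bFinal arr f0 ms out_a out_f x cur := by
  have hE : arr.length - 1 = k := by omega
  have hkn : k < arr.length := by omega
  have hn2 : 2 ≤ arr.length := by omega
  have hdk : arr.drop k = [arr.getD k 0] := by
    rw [pv_drop_eq_getD_cons arr k (0:Int) hkn, List.drop_eq_nil_of_le (by omega)]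
  have ha2 : a = out_a ++ [x, arr.getD k 0] := by rw [ha, hdk]
  have halen : a.length = i + 2 := by
    rw [ha2]; simp only [List.length_append, List.length_cons, List.length_nil]; omega
  have hx : a.getD i 0 = x := by rw [ha, hi]; exact pv_read0 _ _ _ _
  have hy : a.getD (i+1) 0 = arr.getD k 0 := by rw [ha, hi]; exact pv_read1 _ _ _ _ _
  have hfi : f.getD i false = cur := by rw [hf, ← hof]; exact pv_read0 _ _ _ _
  unfold bFinal
  rw [hE, aLoop, dif_pos (by omega)]
  by_cases hgap : a.getD (i+1) 0 - a.getD i 0 < ms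
  · rw [dif_pos hgap]
    have hyx : ¬ ms ≤ arr.getD k 0 - x := by rw [hy, hx] at hgap; omega
    rw [if_neg hyx]
    by_cases hi0 : i = 0
    · rw [if_pos hi0]
      subst hi0
      have hoa : out_a = [] := List.eq_nil_of_length_eq_zero (by omega)
      have hoaf : out_f = [] := List.eq_nil_of_length_eq_zero (by omega)
      subst hoa; subst hoaf
      simp only [List.nil_append] at ha2 hf
      have hnc : ¬(cur = true ∧ f.getD 1 false = false) := by
        rintro ⟨h1, h2⟩
        exact (hcr rfl) (crash_two ms a f (by omega) (by simpa using hgap)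
          (by simpa [h1] using hfi) h2)
      have hcond : aCondR ms a f 0 = false := by
        cases hcu : cur with
        | false =>
          have hfx : f.getD 0 false = false := by rw [hfi, hcu]
          rw [aCondR, hfx]
          rfl
        | true =>
          have h1 : f.getD 1 false = true := by
            cases h : f.getD 1 false
            · exact absurd ⟨hcu, h⟩ hnc
            · rfl
          rw [aCondR, hfi, hcu, show (0:Nat) + 1 = 1 from rfl, h1]
          rfl
      rw [hcond]
      simp only [Bool.false_eq_true, if_false]
      have hea : a.eraseIdx (0+1) = [x] := by rw [ha2]; rfl
      rw [hea, aLoop, dif_neg (by simp)]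
      rw [if_neg (show ¬(([] : List Int) ≠ [] ∧ cur = true ∧ ([] : List Bool).getLastD false = false ∧
            2*ms ≤ x - ([] : List Int).getLastD 0) from by rintro ⟨h, -⟩; exact h rfl),
        if_neg (show ¬(([] : List Int) ≠ []) from fun h => h rfl)]
      refine Prod.ext rfl ?_
      show f.eraseIdx (if f.getD 0 false then 1 else 0) = f0.drop k
      rw [hfi]
      cases hcu : cur with
      | false =>
        rw [if_neg (by simp), pv_eraseIdx_zero, hf, hcu, List.tail_cons]
      | true =>
        have h1 : f.getD 1 false = true := by
          cases h : f.getD 1 false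
          · exact absurd ⟨hcu, h⟩ hnc
          · rfl
        rw [hf, hcu] at h1 ⊢
        cases hdropf : f0.drop k with
        | nil => rw [hdropf] at h1; simp [List.getD] at h1
        | cons r rs =>
          rw [hdropf] at h1
          have hr : r = true := by simpa [List.getD] using h1
          rw [if_pos rfl, hr]
          rfl
    · have hoane : out_a ≠ [] := by
        intro h; rw [h] at hi; simp at hi; exact hi0 hi
      have hofne : out_f ≠ [] := by
        intro h; rw [h] at hof; simp at hof; omega
      have hprev : a.getD (i-1) 0 = out_a.getLastD 0 := by
        rw [ha, hi]; exact pv_read_last _ _ _ _ hoane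
      have hfprev : f.getD (i-1) false = out_f.getLastD false := by
        rw [hf, ← hof]; exact pv_read_last _ _ _ _ hofne
      have hcLiff : aCondL ms a f i =
          (cur && !(out_f.getLastD false) && decide (2*ms ≤ x - out_a.getLastD 0)) := by
        rw [aCondL, hfi, hfprev, hx, hprev]
      rw [if_neg hi0, if_pos (show i = a.length - 2 from by omega)]
      by_cases hcL : aCondL ms a f i = true
      · rw [hcLiff] at hcL
        simp only [Bool.and_eq_true, Bool.not_eq_eq_eq_not, Bool.not_true,
          decide_eq_true_eq] at hcL
        obtain ⟨⟨w1, w2⟩, w3⟩ := hcL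
        rw [if_pos (show aCondL ms a f i = true from by
            rw [hcLiff, w1, w2]; simp only [Bool.not_false, Bool.true_and, decide_eq_true_eq]
            exact w3),
          if_pos ⟨hoane, w1, w2, w3⟩, hy]
        have ha3 : a.set i (arr.getD k 0 - ms) =
            out_a ++ (arr.getD k 0 - ms) :: arr.drop k := by
          rw [ha, hi, pv_set_append_cons_self]
        have g1 : (out_a ++ (arr.getD k 0 - ms) :: arr.drop k).getD (i+1) 0 = arr.getD k 0 := by
          rw [hi]; exact pv_read1 _ _ _ _ _
        have g0 : (out_a ++ (arr.getD k 0 - ms) :: arr.drop k).getD i 0 = arr.getD k 0 - ms := by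
          rw [hi]; exact pv_read0 _ _ _ _
        rw [ha3, aLoop,
          dif_pos (by simp only [List.length_append, List.length_cons, List.length_drop]; omega),
          dif_neg (by rw [g1, g0]; omega),
          aLoop, dif_neg (by simp only [List.length_append, List.length_cons, List.length_drop]; omega)]
        rw [hf, hdk]
        simp
      · have hcLd : ¬(cur = true ∧ out_f.getLastD false = false ∧
            2*ms ≤ x - out_a.getLastD 0) := by
          rintro ⟨w1, w2, w3⟩
          apply hcL
          rw [hcLiff, w1, w2]; simp only [Bool.not_false, Bool.true_and, decide_eq_true_eq]
          exact w3
        rw [if_neg hcL,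
          if_neg (show ¬(out_a ≠ [] ∧ cur = true ∧ out_f.getLastD false = false ∧
              2*ms ≤ x - out_a.getLastD 0) from by rintro ⟨-, v1, v2, v3⟩; exact hcLd ⟨v1, v2, v3⟩),
          if_pos hoane, hfi]
        have hea : a.eraseIdx i = out_a ++ arr.drop k := by
          rw [ha, hi, pv_eraseIdx_append_cons_self]
        rw [hea, aLoop,
          dif_neg (by simp only [List.length_append, List.length_drop]; omega)]
        refine Prod.ext (by rw [hdk]) ?_
        show f.eraseIdx (if cur = true then i-1 else i) =
          out_f.dropLast ++ [out_f.getLastD false || cur] ++ f0.drop k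
        cases cur with
        | true =>
          rw [if_pos rfl, hf, show i - 1 = out_f.length - 1 from by omega,
            pv_eraseIdx_append_sub_one out_f _ hofne]
          simp
        | false =>
          rw [if_neg (by simp), hf, ← hof, pv_eraseIdx_append_cons_self]
          conv_lhs => rw [← pv_dropLast_concat_getLastD out_f false hofne]
          simp
  · rw [dif_neg hgap]
    have hyx : ms ≤ arr.getD k 0 - x := by rw [hy, hx] at hgap; omega
    rw [if_pos hyx, aLoop, dif_neg (by omega)]
    rw [ha2, hf]
    simp

-- ---------- the main induction ----------

theorem loop_eq (ms : Int) (arr : List Int) (f0 : List Bool) :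
    ∀ (N : Nat), LoopIH ms arr f0 N := by
  intro N
  induction N with
  | zero =>
    intro out_a out_f x cur k a f i hN hInv
    obtain ⟨-, -, -, -, hk1, hk2, -, -, -⟩ := hInv
    exact ((by omega : False)).elim
  | succ N ih =>
    intro out_a out_f x cur k a f i hN hInv
    obtain ⟨ha, hi, hf, hof, hk1, hk2, hflen, hcr, hwid⟩ := hInv
    by_cases hk : k < arr.length - 1
    case neg =>
      rw [bLoop, dif_neg hk]
      exact final_eq ms arr f0 out_a out_f x cur k a f i ha hi hf hof hk1 hk2 hflen hcr hk
    case pos =>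
    have hkn : k < arr.length := by omega
    have hkf : k < f0.length := by omega
    have halen : a.length = i + 1 + (arr.length - k) := by
      rw [ha]; simp only [List.length_append, List.length_cons, List.length_drop]; omega
    have hrun : i + 1 < a.length := by omega
    have hx : a.getD i 0 = x := by rw [ha, hi]; exact pv_read0 _ _ _ _
    have hy : a.getD (i+1) 0 = arr.getD k 0 := by rw [ha, hi]; exact pv_read1 _ _ _ _ _
    have hy2 : a.getD (i+2) 0 = arr.getD (k+1) 0 := by rw [ha, hi]; exact pv_read2 _ _ _ _ _
    have hfi : f.getD i false = cur := by rw [hf, ← hof]; exact pv_read0 _ _ _ _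
    have hfi1 : f.getD (i+1) false = f0.getD k false := by
      rw [hf, ← hof]; exact pv_read1 _ _ _ _ _
    rw [aLoop, dif_pos hrun]
    by_cases hgap : a.getD (i+1) 0 - a.getD i 0 < ms
    case neg =>
      rw [dif_neg hgap]
      have hc1 : ms ≤ arr.getD k 0 - x := by rw [hy, hx] at hgap; omega
      rw [bLoop, dif_pos hk, if_pos hc1]
      exact step_commit ms arr f0 N out_a out_f x cur k a f i ih ha hi hf hof hk1 hk hflen hN hc1
    case pos =>
    rw [dif_pos hgap]
    have hyx : ¬ ms ≤ arr.getD k 0 - x := by rw [hy, hx] at hgap; omega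
    rw [bLoop, dif_pos hk, if_neg hyx]
    by_cases hi0 : i = 0
    · -- cursor at the first tile
      have hoa : out_a = [] := List.eq_nil_of_length_eq_zero (by omega)
      rw [if_pos hi0]
      by_cases hc2 : cur = true ∧ f0.getD k false = false ∧
          2*ms ≤ arr.getD (k+1) 0 - arr.getD k 0
      · have hcR : aCondR ms a f i = true := by
          rw [aCondR, hfi, hfi1, hy2, hy, hc2.1, hc2.2.1]
          simp only [Bool.not_false, Bool.true_and, decide_eq_true_eq]
          exact hc2.2.2
        rw [if_pos hcR, if_pos hc2, hx]
        exact step_widenR ms arr f0 N out_a out_f x cur k a f i ih ha hi hf hof hk1 hk hflen hN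
      · have hcR : ¬ (aCondR ms a f i = true) := by
          intro hcc
          rw [aCondR, hfi, hfi1, hy2, hy] at hcc
          simp only [Bool.and_eq_true, Bool.not_eq_eq_eq_not, Bool.not_true,
            decide_eq_true_eq] at hcc
          exact hc2 ⟨hcc.1.1, hcc.1.2, hcc.2⟩
        rw [if_neg hcR, if_neg hc2,
          if_neg (show ¬(out_a ≠ [] ∧ cur = true ∧ out_f.getLastD false = false ∧
              2*ms ≤ x - out_a.getLastD 0) from by rintro ⟨h, -⟩; exact h hoa),
          if_pos (Or.inl hoa), hfi]
        have hcr' : out_a = [] → ¬ Crash_min_size_filter ms (a.eraseIdx (i+1))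
            (f.eraseIdx (if cur = true then i+1 else i)) := by
          intro _ hC
          apply hcr hoa
          refine crash_shift ms a f (by omega) ?_ ?_ ?_
          · rw [hi0] at hgap; simpa using hgap
          · rintro ⟨u1, u2, u3⟩
            rw [hi0] at hfi hfi1 hy2 hy
            simp only [Nat.zero_add] at hfi1 hy2 hy
            rw [hfi] at u1
            rw [hfi1] at u2
            rw [hy2, hy] at u3
            exact hc2 ⟨u1, u2, u3⟩
          · rw [hi0] at hfi hC
            rw [hfi]
            simpa [hi0] using hC
        exact step_mergeR ms arr f0 N out_a out_f x cur k a f i ih ha hi hf hof hk1 hk hflen hN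
          hcr' (fun h => absurd hoa h)
    · -- cursor strictly inside
      have hoane : out_a ≠ [] := by
        intro h; rw [h] at hi; simp at hi; exact hi0 hi
      have hofne : out_f ≠ [] := by
        intro h; rw [h] at hof; simp at hof; omega
      have hprev : a.getD (i-1) 0 = out_a.getLastD 0 := by
        rw [ha, hi]; exact pv_read_last _ _ _ _ hoane
      have hfprev : f.getD (i-1) false = out_f.getLastD false := by
        rw [hf, ← hof]; exact pv_read_last _ _ _ _ hofne
      have hcLiff : aCondL ms a f i =
          (cur && !(out_f.getLastD false) && decide (2*ms ≤ x - out_a.getLastD 0)) := by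
        rw [aCondL, hfi, hfprev, hx, hprev]
      have hwl : ms ≤ x - out_a.getLastD 0 := by
        rcases hwid hoane with h | h
        · exact h
        · rw [hy, hx] at hgap; omega
      rw [if_neg hi0, if_neg (show ¬ i = a.length - 2 from by omega)]
      by_cases hc2 : cur = true ∧ f0.getD k false = false ∧
          2*ms ≤ arr.getD (k+1) 0 - arr.getD k 0
      · have hcR : aCondR ms a f i = true := by
          rw [aCondR, hfi, hfi1, hy2, hy, hc2.1, hc2.2.1]
          simp only [Bool.not_false, Bool.true_and, decide_eq_true_eq]
          exact hc2.2.2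
        rw [if_pos hcR, if_pos hcR, ite_self, if_pos hc2, hx]
        exact step_widenR ms arr f0 N out_a out_f x cur k a f i ih ha hi hf hof hk1 hk hflen hN
      · have hcR : ¬ (aCondR ms a f i = true) := by
          intro hcc
          rw [aCondR, hfi, hfi1, hy2, hy] at hcc
          simp only [Bool.and_eq_true, Bool.not_eq_eq_eq_not, Bool.not_true,
            decide_eq_true_eq] at hcc
          exact hc2 ⟨hcc.1.1, hcc.1.2, hcc.2⟩
        rw [if_neg hcR, if_neg hcR]
        by_cases hc3 : cur = true ∧ out_f.getLastD false = false ∧ 2*ms ≤ x - out_a.getLastD 0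
        · have hcL : aCondL ms a f i = true := by
            rw [hcLiff, hc3.1, hc3.2.1]
            simp only [Bool.not_false, Bool.true_and, decide_eq_true_eq]
            exact hc3.2.2
          rw [if_pos hcL, if_pos hcL, ite_self, if_neg hc2,
            if_pos ⟨hoane, hc3.1, hc3.2.1, hc3.2.2⟩, hy]
          exact step_widenL ms arr f0 N out_a out_f x cur k a f i ih ha hi hf hof hk1 hk hflen hN
        · have hcL : ¬ (aCondL ms a f i = true) := by
            intro hcc
            rw [hcLiff] at hcc
            simp only [Bool.and_eq_true, Bool.not_eq_eq_eq_not, Bool.not_true,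
              decide_eq_true_eq] at hcc
            exact hc3 ⟨hcc.1.1, hcc.1.2, hcc.2⟩
          rw [if_neg hcL, if_neg hcL]
          have hcmp : (a.getD i 0 - a.getD (i-1) 0 > a.getD (i+2) 0 - a.getD (i+1) 0) ↔
              (arr.getD (k+1) 0 - arr.getD k 0 < x - out_a.getLastD 0) := by
            rw [hx, hprev, hy2, hy]
          by_cases hlw : arr.getD (k+1) 0 - arr.getD k 0 < x - out_a.getLastD 0
          · rw [if_pos (hcmp.mpr hlw), if_neg hc2,
              if_neg (show ¬(out_a ≠ [] ∧ cur = true ∧ out_f.getLastD false = false ∧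
                  2*ms ≤ x - out_a.getLastD 0) from by
                rintro ⟨-, v1, v2, v3⟩; exact hc3 ⟨v1, v2, v3⟩),
              if_pos (Or.inr hlw), hfi]
            exact step_mergeR ms arr f0 N out_a out_f x cur k a f i ih ha hi hf hof hk1 hk
              hflen hN (fun h0 => absurd h0 hoane) (fun _ => hwl)
          · rw [if_neg (fun hh => absurd (hcmp.mp hh) hlw), if_neg hc2,
              if_neg (show ¬(out_a ≠ [] ∧ cur = true ∧ out_f.getLastD false = false ∧
                  2*ms ≤ x - out_a.getLastD 0) from by
                rintro ⟨-, v1, v2, v3⟩; exact hc3 ⟨v1, v2, v3⟩),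
              if_neg (show ¬(out_a = [] ∨ arr.getD (k+1) 0 - arr.getD k 0 < x - out_a.getLastD 0)
                from by rintro (h | h); exacts [hoane h, hlw h]), hfi]
            have hnw : ms ≤ arr.getD (k+1) 0 - arr.getD k 0 := by omega
            exact step_mergeL ms arr f0 N out_a out_f x cur k a f i ih ha hi hf hof hk1 hk
              hflen hN hi0 hnw

-- ===== VERDICT (by name: the statement is the Claim_ definition above) =====
theorem min_size_filter_spec : Claim_equal_min_size_filter := by
  intro arr f0 ms hdom hpre
  unfold Spec_min_size_filter min_size_filter min_size_filter_alt
  by_cases h1 : arr.length ≤ 1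
  · rw [if_pos h1, aLoop, dif_neg (by omega)]
  · rw [if_neg h1]
    have h2 : arr.length ≤ f0.length + 1 ∧ ¬ Crash_min_size_filter ms arr f0 := by
      rcases hpre with h | h
      · exact absurd h h1
      · exact h
    have h0 : 0 < arr.length := by omega
    have hf0 : 0 < f0.length := by omega
    refine loop_eq ms arr f0 arr.length [] [] (arr.getD 0 0) (f0.getD 0 false) 1 arr f0 0
      (by omega) ?_
    refine ⟨?_, rfl, ?_, rfl, le_refl 1, by omega, h2.1, fun _ => h2.2,
      fun h => absurd rfl h⟩
    · have h := pv_drop_eq_getD_cons arr 0 (0:Int) h0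
      simpa using h
    · have h := pv_drop_eq_getD_cons f0 0 false hf0
      simpa using h
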